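-- pv_equiv track=rewrite | github.com/maciejsobieniak/code-kata | codesignal/24/solution.py | solution
-- ===== SOURCE A (Python) =====
-- def solution(sentence):
--     result_output = ''
--     words = sentence.split(' ')
--     for word in words:
--         if len(word) % 2 != 0:
--             for i in range(0, len(word), 2):
--                 result_output += word[i]
--     return result_output[::-1]
-- ===== SOURCE B (Python) =====
-- def solution(sentence):
--     out = []
--     buf = []
--     for ch in reversed(sentence):
--         if ch == ' ':
--             if len(buf) % 2 == 1:
--                 for i in range(0, len(buf), 2):
--                     out.append(buf[i])
--             buf = []
--         else:
--             buf.append(ch)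
--     if len(buf) % 2 == 1:
--         for i in range(0, len(buf), 2):
--             out.append(buf[i])
--     return ''.join(out)
-- ===== Notes on version B (the rewrite author's own statement) =====
-- stated objective: alternative
-- what changed: B replaces A's split-into-words / per-word even-index collection / final [::-1] pipeline by a single reverse character scan with a buffer state machine: scanning the string from the end, non-space chars are buffered, and at each space (and at the end) an odd-length buffer's even positions are flushed straight to the output, so no split() and no reversal step exist; correct because for an odd-length word the even indices from the start are exactly the even offsets from the end.
import Mathlib
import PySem

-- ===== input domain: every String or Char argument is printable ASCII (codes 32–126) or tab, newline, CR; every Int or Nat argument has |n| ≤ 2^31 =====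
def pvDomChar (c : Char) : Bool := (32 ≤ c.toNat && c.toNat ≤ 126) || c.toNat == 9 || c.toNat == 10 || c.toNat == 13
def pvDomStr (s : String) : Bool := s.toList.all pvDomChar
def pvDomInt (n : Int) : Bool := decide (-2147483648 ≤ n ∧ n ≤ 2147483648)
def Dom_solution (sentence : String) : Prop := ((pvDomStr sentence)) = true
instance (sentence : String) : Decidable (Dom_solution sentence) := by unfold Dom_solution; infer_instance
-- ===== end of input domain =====

-- B is a single reverse character-scan state machine (no split, no final reversal): it flushes each space-delimited buffer's even positions directly; alternative decomposition, same cost.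


-- ===== PORT A =====
def solution (sentence : String) : String :=
  let words := PySem.Chars.splitOn sentence.toList [' ']
  let result_output := words.foldl (fun acc word =>
    if word.length % 2 ≠ 0 then
      (PySem.List.pyRange 0 (word.length : Int) 2).foldl
        (fun a i => a ++ (PySem.List.pyGet? word i).elim [] (fun c => [c])) acc
    else acc) ([] : List Char)
  String.ofList ((PySem.List.slice? result_output none none (-1)).getD [])

-- ===== PORT B =====
-- one step of the reverse scan: space flushes the buffer's even positions, any other char is buffered
def pvStep (st : List Char × List Char) (ch : Char) : List Char × List Char :=
  if ch = ' ' then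
    ((if st.2.length % 2 = 1 then
        st.1 ++ (PySem.List.pyRange 0 (st.2.length : Int) 2).foldl
          (fun a i => a ++ (PySem.List.pyGet? st.2 i).elim [] (fun c => [c])) []
      else st.1), [])
  else (st.1, st.2 ++ [ch])

def solution_alt (sentence : String) : String :=
  let r := sentence.toList.reverse.foldl pvStep ([], [])
  String.ofList (if r.2.length % 2 = 1 then
      r.1 ++ (PySem.List.pyRange 0 (r.2.length : Int) 2).foldl
        (fun a i => a ++ (PySem.List.pyGet? r.2 i).elim [] (fun c => [c])) []
    else r.1)

-- ===== PRECONDITION & SPEC =====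
def Spec_solution (sentence : String) (out : String) : Prop := out = solution_alt sentence
instance (sentence : String) (out : String) : Decidable (Spec_solution sentence out) := by unfold Spec_solution; infer_instance

-- ===== CLAIM =====
def Claim_equal_solution : Prop := ∀ (sentence : String), Dom_solution sentence → Spec_solution sentence (solution sentence)

-- ===== LEMMAS AND PROOFS =====

def pvH (w : List Char) (i : Int) : List Char := (PySem.List.pyGet? w i).elim [] (fun c => [c])

def pvE (w : List Char) : List Char := (PySem.List.pyRange 0 (w.length : Int) 2).flatMap (pvH w)

def pvF (w : List Char) : List Char := if w.length % 2 ≠ 0 then pvE w else []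

def pvEmit (w : List Char) : List Char := if w.length % 2 = 1 then pvE w else []

def pvFin (st : List Char × List Char) : List Char := st.1 ++ pvEmit st.2

-- structural split on one space character (what splitOn computes for sep = " ")
def pvMsplit : List Char → List Char → List (List Char)
  | pre, [] => [pre]
  | pre, c :: rest => if c = ' ' then pre :: pvMsplit [] rest else pvMsplit (pre ++ [c]) rest

theorem pvMsplit_ne_nil (pre l : List Char) : pvMsplit pre l ≠ [] := by
  induction l generalizing pre with
  | nil => simp [pvMsplit]
  | cons c rest ih =>
    by_cases h : c = ' ' <;> simp [pvMsplit, h, ih]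

theorem pv_go_eq (l : List Char) : ∀ (fuel : Nat) (cur : List Char) (acc : List (List Char)),
    l.length < fuel →
    PySem.Chars.splitOn.go [' '] fuel l cur acc = acc.reverse ++ pvMsplit cur.reverse l := by
  induction l with
  | nil =>
    intro fuel cur acc h
    cases fuel with
    | zero => omega
    | succ f => rw [PySem.Chars.splitOn.go.eq_def]; simp [pvMsplit]
  | cons c rest ih =>
    intro fuel cur acc h
    cases fuel with
    | zero => omega
    | succ f =>
      simp only [List.length_cons] at h
      by_cases hc : c = ' '
      · subst hc
        have hstep : PySem.Chars.splitOn.go [' '] (f + 1) (' ' :: rest) cur acc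
            = PySem.Chars.splitOn.go [' '] f rest [] (cur.reverse :: acc) := by
          rw [PySem.Chars.splitOn.go.eq_def]; simp [List.isPrefixOf]
        rw [hstep, ih f [] (cur.reverse :: acc) (by omega)]
        simp [pvMsplit]
      · have hstep : PySem.Chars.splitOn.go [' '] (f + 1) (c :: rest) cur acc
            = PySem.Chars.splitOn.go [' '] f rest (c :: cur) acc := by
          rw [PySem.Chars.splitOn.go.eq_def]; simp [List.isPrefixOf]
          intro h'; exact absurd h'.symm hc
        rw [hstep, ih f (c :: cur) acc (by omega)]
        simp [pvMsplit, hc]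

theorem pv_splitOn_eq (l : List Char) :
    PySem.Chars.splitOn l [' '] = pvMsplit [] l := by
  unfold PySem.Chars.splitOn
  rw [pv_go_eq l (l.length + 1) [] [] (by omega)]
  simp

-- head/tail shape of pvMsplit with a nonempty prefix accumulator
theorem pvMsplit_pre (l : List Char) : ∀ (pre : List Char),
    pvMsplit pre l = (pre ++ (pvMsplit [] l).headI) :: (pvMsplit [] l).tail := by
  induction l with
  | nil => intro pre; simp [pvMsplit]
  | cons c rest ih =>
    intro pre
    by_cases h : c = ' '
    · simp [pvMsplit, h]
    · simp only [pvMsplit, if_neg h]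
      rw [ih (pre ++ [c])]
      rw [show ([] : List Char) ++ [c] = [c] from rfl, ih [c]]
      simp

theorem pvMsplit_append_single (m : List Char) : ∀ (pre : List Char) (c : Char),
    pvMsplit pre (m ++ [c]) =
      if c = ' ' then pvMsplit pre m ++ [[]]
      else (pvMsplit pre m).dropLast ++ [(pvMsplit pre m).getLastD [] ++ [c]] := by
  induction m with
  | nil =>
    intro pre c
    by_cases h : c = ' ' <;> simp [pvMsplit, h]
  | cons d m' ih =>
    intro pre c
    by_cases hd : d = ' '
    · simp only [List.cons_append, pvMsplit, if_pos hd, ih]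
      by_cases h : c = ' '
      · simp [h]
      · have hne := pvMsplit_ne_nil [] m'
        simp only [if_neg h]
        rw [List.dropLast_cons_of_ne_nil (by
          cases hm : pvMsplit [] m' with
          | nil => exact absurd hm hne
          | cons a t => simp)]
        cases hm : pvMsplit [] m' with
        | nil => exact absurd hm hne
        | cons a t => simp
    · simp only [List.cons_append, pvMsplit, if_neg hd, ih]

theorem pvMsplit_reverse (l : List Char) :
    pvMsplit [] l.reverse = ((pvMsplit [] l).map List.reverse).reverse := by
  induction l with
  | nil => simp [pvMsplit]
  | cons c t ih =>
    rw [List.reverse_cons, pvMsplit_append_single t.reverse [] c]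
    by_cases h : c = ' '
    · rw [if_pos h, ih]
      simp [pvMsplit, h]
    · rw [if_neg h, ih]
      have hne := pvMsplit_ne_nil [] t
      cases hm : pvMsplit [] t with
      | nil => exact absurd hm hne
      | cons a tl =>
        simp only [pvMsplit, if_neg h, List.nil_append]
        rw [pvMsplit_pre t [c], hm]
        simp

-- A's fold characterization
theorem pv_foldA (l : List (List Char)) (acc : List Char) :
    l.foldl (fun acc word =>
      if word.length % 2 ≠ 0 then
        (PySem.List.pyRange 0 (word.length : Int) 2).foldl
          (fun a i => a ++ (PySem.List.pyGet? word i).elim [] (fun c => [c])) acc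
      else acc) acc = acc ++ l.flatMap pvF := by
  induction l generalizing acc with
  | nil => simp
  | cons w l ih =>
    simp only [List.foldl_cons, List.flatMap_cons]
    by_cases h : w.length % 2 ≠ 0
    · rw [if_pos h, PySem.List.foldl_append_eq_flatMap, ih]
      simp [pvF, pvE, h, List.append_assoc]
      rfl
    · rw [if_neg h, ih]
      simp [pvF, h]

-- B's fold characterization
theorem pv_foldB (m : List Char) : ∀ (out buf : List Char),
    pvFin (m.foldl pvStep (out, buf)) = out ++ (pvMsplit buf m).flatMap pvEmit := by
  induction m with
  | nil => intro out buf; simp [pvFin, pvMsplit]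
  | cons c rest ih =>
    intro out buf
    by_cases h : c = ' '
    · simp only [List.foldl_cons, pvStep, if_pos h]
      rw [PySem.List.foldl_append_eq_flatMap, ih]
      simp only [pvMsplit, if_pos h, List.flatMap_cons]
      by_cases hb : buf.length % 2 = 1
      · simp [hb, pvEmit, pvE]
        rfl
      · simp [hb, pvEmit]
    · simp only [List.foldl_cons, pvStep, if_neg h]
      rw [ih]
      simp [pvMsplit, h]

-- even-position extraction commutes with reversal on odd-length buffers
theorem pv_pyRange_even (m : Nat) :
    PySem.List.pyRange 0 (2 * (m : Int) + 1) 2 = (List.range (m + 1)).map (fun j => ((2 * j : Nat) : Int)) := by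
  unfold PySem.List.pyRange
  rw [if_neg (by omega : ¬ (2:Int) = 0)]
  rw [if_pos (by omega : (0:Int) < 2), if_pos (by omega : (0:Int) < 2 * (m:Int) + 1)]
  have c1 : ((2 * (m:Int) + 1 - 0 + 2 - 1) / 2).toNat = m + 1 := by omega
  rw [c1]
  apply List.map_congr_left
  intro j _
  push_cast
  ring

theorem pv_flatMap_singleton {α β : Type} (l : List α) (f : α → List β) (g : α → β)
    (h : ∀ j ∈ l, f j = [g j]) : l.flatMap f = l.map g := by
  induction l with
  | nil => simp
  | cons a t ih =>
    simp only [List.flatMap_cons, List.map_cons, h a (by simp)]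
    rw [ih (fun j hj => h j (by simp [hj]))]
    rfl

theorem pv_pvE_map (w : List Char) (m : Nat) (hw : w.length = 2 * m + 1) :
    pvE w = (List.range (m + 1)).map (fun j => w.getD (2 * j) 'x') := by
  unfold pvE
  rw [show ((w.length : Int)) = 2 * (m : Int) + 1 by rw [hw]; push_cast; ring]
  rw [pv_pyRange_even, List.flatMap_map]
  apply pv_flatMap_singleton
  intro j hj
  rw [List.mem_range] at hj
  have hjb : 2 * j < w.length := by omega
  unfold pvH
  rw [PySem.List.pyGet?_natCast, List.getElem?_eq_getElem hjb]
  simp [List.getD, List.getElem?_eq_getElem hjb]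

theorem pv_pvE_reverse (w : List Char) (h : w.length % 2 = 1) :
    pvE w.reverse = (pvE w).reverse := by
  obtain ⟨m, hm⟩ : ∃ m, w.length = 2 * m + 1 := ⟨w.length / 2, by omega⟩
  rw [pv_pvE_map w m hm, pv_pvE_map w.reverse m (by simpa using hm)]
  apply List.ext_getElem
  · simp
  · intro i h1 h2
    simp only [List.length_map, List.length_range] at h1 h2
    rw [List.getElem_reverse]
    simp only [List.getElem_map, List.getElem_range, List.length_map, List.length_range]
    have hb1 : 2 * i < w.length := by omega
    have hb2 : 2 * (m + 1 - 1 - i) < w.length := by omega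
    rw [List.getD_eq_getElem _ 'x' (by simpa using hb1),
        List.getD_eq_getElem _ 'x' hb2, List.getElem_reverse]
    congr 1
    omega

theorem pv_emit_rev (w : List Char) : pvEmit w.reverse = (pvF w).reverse := by
  by_cases h : w.length % 2 = 1
  · simp only [pvEmit, pvF, List.length_reverse, if_pos h, if_pos (by omega : w.length % 2 ≠ 0)]
    exact pv_pvE_reverse w h
  · simp [pvEmit, pvF, h]

-- ===== VERDICT =====
theorem solution_spec : Claim_equal_solution := by
  intro s _
  unfold Spec_solution solution solution_alt
  simp only [PySem.List.slice?_none_none_neg_one, Option.getD_some]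
  rw [pv_foldA, pv_splitOn_eq]
  have hB : (if (s.toList.reverse.foldl pvStep ([], [])).2.length % 2 = 1 then
      (s.toList.reverse.foldl pvStep ([], [])).1 ++ (PySem.List.pyRange 0 ((s.toList.reverse.foldl pvStep ([], [])).2.length : Int) 2).foldl
        (fun a i => a ++ (PySem.List.pyGet? (s.toList.reverse.foldl pvStep ([], [])).2 i).elim [] (fun c => [c])) []
      else (s.toList.reverse.foldl pvStep ([], [])).1)
      = pvFin (s.toList.reverse.foldl pvStep ([], [])) := by
    unfold pvFin pvEmit pvE
    by_cases hb : (s.toList.reverse.foldl pvStep ([], [])).2.length % 2 = 1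
    · rw [if_pos hb, if_pos hb, PySem.List.foldl_append_eq_flatMap]
      rfl
    · rw [if_neg hb, if_neg hb]
      exact (List.append_nil _).symm
  rw [hB, pv_foldB, pvMsplit_reverse]
  simp only [List.nil_append]
  rw [List.reverse_flatMap]
  rw [show (pvMsplit [] s.toList).map List.reverse = ((pvMsplit [] s.toList).reverse.map List.reverse).reverse by simp]
  rw [List.reverse_reverse, List.flatMap_map]
  have hfun : (List.reverse ∘ pvF) = (fun a => pvEmit a.reverse) := by
    funext w
    exact (pv_emit_rev w).symm
  rw [hfun]
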